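-- pv_equiv track=rewrite | github.com/d0lim/ps | programmers/python/42840.py | solution_good
-- ===== SOURCE A (Python) =====
-- def solution_good(answers):
--     pattern1 = [1,2,3,4,5]
--     pattern2 = [2,1,2,3,2,4,2,5]
--     pattern3 = [3,3,1,1,2,2,4,4,5,5]
--     score = [0, 0, 0]
--     result = []
--
--     for idx, answer in enumerate(answers):
--         if answer == pattern1[idx%len(pattern1)]:
--             score[0] += 1
--         if answer == pattern2[idx%len(pattern2)]:
--             score[1] += 1
--         if answer == pattern3[idx%len(pattern3)]:
--             score[2] += 1
--
--     for idx, s in enumerate(score):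
--         if s == max(score):
--             result.append(idx+1)
--
--     return result
-- ===== SOURCE B (Python) =====
-- def solution_good(answers):
--     patterns = [[1, 2, 3, 4, 5],
--                 [2, 1, 2, 3, 2, 4, 2, 5],
--                 [3, 3, 1, 1, 2, 2, 4, 4, 5, 5]]
--     n = len(answers)
--     scores = []
--     for pat in patterns:
--         L = len(pat)
--         total = 0
--         for start in range(0, n, L):
--             total += sum(1 for a, b in zip(answers[start:start + L], pat) if a == b)
--         scores.append(total)
--     best = max(scores)
--     return [i + 1 for i, s in enumerate(scores) if s == best]
-- ===== Notes on version B (the rewrite author's own statement) =====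
-- stated objective: alternative
-- what changed: A makes one pass over answers indexing each pattern by idx % len(pattern); B instead decomposes answers into fixed-size blocks per pattern (range(0, n, len(pat))) and compares each block elementwise against the pattern with zip, eliminating per-element modular indexing entirely.
import Mathlib
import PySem

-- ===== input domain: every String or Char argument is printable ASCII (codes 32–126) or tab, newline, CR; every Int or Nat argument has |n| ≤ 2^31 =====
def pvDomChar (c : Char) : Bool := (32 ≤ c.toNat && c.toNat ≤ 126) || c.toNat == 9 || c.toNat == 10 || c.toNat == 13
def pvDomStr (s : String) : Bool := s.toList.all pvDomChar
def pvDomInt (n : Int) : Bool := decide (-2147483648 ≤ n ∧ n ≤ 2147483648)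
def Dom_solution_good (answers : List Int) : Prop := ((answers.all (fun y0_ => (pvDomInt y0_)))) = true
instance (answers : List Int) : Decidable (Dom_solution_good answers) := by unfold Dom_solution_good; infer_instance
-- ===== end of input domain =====

-- B replaces A's single pass with per-element modular pattern indexing by a per-pattern
-- block decomposition: answers is cut into len(pattern)-sized blocks and each block is
-- compared elementwise (zip) against the pattern; same asymptotic cost, different algorithm.

-- ===== PORT A =====
def pvPat1 : List Int := [1, 2, 3, 4, 5]
def pvPat2 : List Int := [2, 1, 2, 3, 2, 4, 2, 5]
def pvPat3 : List Int := [3, 3, 1, 1, 2, 2, 4, 4, 5, 5]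

-- pattern[idx % len(pattern)] is always in range, so pyGetD is exact here
def solution_good (answers : List Int) : List Int :=
  let score :=
    (PySem.List.enumerate answers).foldl
      (fun (s : Int × Int × Int) p =>
        let s := if p.2 = PySem.List.pyGetD pvPat1 (PySem.Int.mod p.1 (pvPat1.length : Int)) 0 then
                   (s.1 + 1, s.2.1, s.2.2) else s
        let s := if p.2 = PySem.List.pyGetD pvPat2 (PySem.Int.mod p.1 (pvPat2.length : Int)) 0 then
                   (s.1, s.2.1 + 1, s.2.2) else s
        if p.2 = PySem.List.pyGetD pvPat3 (PySem.Int.mod p.1 (pvPat3.length : Int)) 0 then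
          (s.1, s.2.1, s.2.2 + 1) else s)
      (0, 0, 0)
  let scoreL : List Int := [score.1, score.2.1, score.2.2]
  (PySem.List.enumerate scoreL).foldl
    (fun r p => if p.2 = (PySem.List.max? scoreL (fun y => y)).getD 0 then r ++ [p.1 + 1] else r)
    []

-- ===== PORT B =====
def solution_good_alt (answers : List Int) : List Int :=
  let n : Int := answers.length
  let scores :=
    [pvPat1, pvPat2, pvPat3].foldl
      (fun sc pat =>
        let total :=
          (PySem.List.pyRange 0 n (pat.length : Int)).foldl
            (fun total start =>
              total + ((PySem.List.slice answers (some start) (some (start + (pat.length : Int)))).zip pat).foldl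
                  (fun acc q => if q.1 = q.2 then acc + 1 else acc) 0)
            0
        sc ++ [total])
      ([] : List Int)
  let best := (PySem.List.max? scores (fun y => y)).getD 0
  (PySem.List.enumerate scores).foldl
    (fun r q => if q.2 = best then r ++ [q.1 + 1] else r)
    []

-- ===== PRECONDITION & SPEC =====
def Spec_solution_good (answers : List Int) (out : List Int) : Prop := out = solution_good_alt answers
instance (answers : List Int) (out : List Int) : Decidable (Spec_solution_good answers out) := by unfold Spec_solution_good; infer_instance

-- ===== CLAIM (what is proved, stated in full; the proofs are below) =====
def Claim_equal_solution_good : Prop := ∀ (answers : List Int), Dom_solution_good answers → Spec_solution_good answers (solution_good answers)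

-- ===== LEMMAS AND PROOFS =====

-- A's interleaved fold computes, componentwise, the three per-pattern counting folds
theorem pv_fold_triple (l : List (Int × Int)) (a b c : Int) :
    l.foldl
      (fun (s : Int × Int × Int) p =>
        let s := if p.2 = PySem.List.pyGetD pvPat1 (PySem.Int.mod p.1 (pvPat1.length : Int)) 0 then
                   (s.1 + 1, s.2.1, s.2.2) else s
        let s := if p.2 = PySem.List.pyGetD pvPat2 (PySem.Int.mod p.1 (pvPat2.length : Int)) 0 then
                   (s.1, s.2.1 + 1, s.2.2) else s
        if p.2 = PySem.List.pyGetD pvPat3 (PySem.Int.mod p.1 (pvPat3.length : Int)) 0 then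
          (s.1, s.2.1, s.2.2 + 1) else s)
      (a, b, c)
    = (l.foldl (fun acc q => if q.2 = PySem.List.pyGetD pvPat1 (PySem.Int.mod q.1 (pvPat1.length : Int)) 0 then acc + 1 else acc) a,
       l.foldl (fun acc q => if q.2 = PySem.List.pyGetD pvPat2 (PySem.Int.mod q.1 (pvPat2.length : Int)) 0 then acc + 1 else acc) b,
       l.foldl (fun acc q => if q.2 = PySem.List.pyGetD pvPat3 (PySem.Int.mod q.1 (pvPat3.length : Int)) 0 then acc + 1 else acc) c) := by
  induction l generalizing a b c with
  | nil => rfl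
  | cons x t ih =>
    simp only [List.foldl_cons]
    split_ifs <;> exact ih _ _ _

-- shifting the enumeration base by the pattern length does not change A's modular count
theorem pv_shift (pat : List Int) (bs : List Int) (s : Nat) :
    (PySem.List.enumerate bs ((s + pat.length : Nat) : Int)).countP
        (fun q => decide (q.2 = PySem.List.pyGetD pat (PySem.Int.mod q.1 (pat.length : Int)) 0))
    = (PySem.List.enumerate bs ((s : Nat) : Int)).countP
        (fun q => decide (q.2 = PySem.List.pyGetD pat (PySem.Int.mod q.1 (pat.length : Int)) 0)) := by
  induction bs generalizing s with
  | nil => rfl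
  | cons b t ih =>
    rw [PySem.List.enumerate_cons, PySem.List.enumerate_cons]
    have h1 : ((s + pat.length : Nat) : Int) + 1 = ((s + 1 + pat.length : Nat) : Int) := by push_cast; ring
    have h2 : ((s : Nat) : Int) + 1 = ((s + 1 : Nat) : Int) := by push_cast; ring
    rw [h1, h2, List.countP_cons, List.countP_cons, ih (s + 1)]
    have h3 : PySem.Int.mod ((s + pat.length : Nat) : Int) (pat.length : Int)
        = PySem.Int.mod ((s : Nat) : Int) (pat.length : Int) := by
      rw [PySem.Int.mod_natCast, PySem.Int.mod_natCast, Nat.add_mod_right]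
    rw [h3]

-- on a block no longer than the pattern, A's modular count is the zip count (offset j into pat)
theorem pv_head (pat : List Int) (as : List Int) (j : Nat)
    (h : j + as.length ≤ pat.length) :
    (PySem.List.enumerate as ((j : Nat) : Int)).countP
        (fun q => decide (q.2 = PySem.List.pyGetD pat (PySem.Int.mod q.1 (pat.length : Int)) 0))
    = (as.zip (pat.drop j)).countP (fun q => decide (q.1 = q.2)) := by
  induction as generalizing j with
  | nil => rfl
  | cons a t ih =>
    have hj : j < pat.length := by simp at h; omega
    rw [PySem.List.enumerate_cons, List.drop_eq_getElem_cons hj, List.zip_cons_cons,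
        List.countP_cons, List.countP_cons]
    have h2 : ((j : Nat) : Int) + 1 = ((j + 1 : Nat) : Int) := by push_cast; ring
    rw [h2, ih (j + 1) (by simp at h ⊢; omega)]
    have h3 : PySem.List.pyGetD pat (PySem.Int.mod ((j : Nat) : Int) (pat.length : Int)) 0 = pat[j] := by
      rw [PySem.Int.mod_natCast, Nat.mod_eq_of_lt hj, PySem.List.pyGetD_natCast,
          List.getD_eq_getElem _ _ hj]
    rw [h3]

-- the zip count of one block, as an Int
def pvZC (pat : List Int) (bl : List Int) : Int :=
  ((bl.zip pat).countP (fun q => decide (q.1 = q.2)) : Int)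

-- A's modular count over xs equals the sum of blockwise zip counts, for any c covering xs
theorem pv_blocks (pat : List Int) :
    ∀ (c : Nat) (xs : List Int), xs.length ≤ c * pat.length →
    ((PySem.List.enumerate xs 0).countP
        (fun q => decide (q.2 = PySem.List.pyGetD pat (PySem.Int.mod q.1 (pat.length : Int)) 0)) : Int)
    = ((List.range c).map (fun k => pvZC pat (List.take pat.length (List.drop (pat.length * k) xs)))).sum := by
  intro c
  induction c with
  | zero =>
    intro xs h
    have : xs = [] := by simpa using List.eq_nil_of_length_eq_zero (by omega)
    subst this; rfl
  | succ c ih =>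
    intro xs h
    rw [List.range_succ_eq_map, List.map_cons, List.sum_cons, List.map_map]
    have hdrop : ∀ k : Nat, List.drop (pat.length * (k + 1)) xs
        = List.drop (pat.length * k) (List.drop pat.length xs) := by
      intro k; rw [List.drop_drop]; congr 1; ring
    by_cases hle : xs.length ≤ pat.length
    · -- single (possibly short) block; the remaining c blocks are empty
      have hdnil : List.drop pat.length xs = [] := by
        simp [List.drop_eq_nil_iff]; omega
      have htake : List.take pat.length xs = xs := List.take_of_length_le hle
      have h0 : (PySem.List.enumerate xs 0) = PySem.List.enumerate xs ((0 : Nat) : Int) := by norm_num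
      rw [h0, pv_head pat xs 0 (by omega)]
      simp [Function.comp_def, hdrop, hdnil, htake, pvZC]
    · -- full first block, recurse on the rest
      have hlt : pat.length < xs.length := by omega
      have hsplit : xs = List.take pat.length xs ++ List.drop pat.length xs := by simp
      have hlen : (List.take pat.length xs).length = pat.length := by simp; omega
      have hrest : (List.drop pat.length xs).length ≤ c * pat.length := by
        rw [List.length_drop]
        have h2 : (c + 1) * pat.length = c * pat.length + pat.length := by ring
        omega
      conv_lhs => rw [hsplit]
      rw [PySem.List.enumerate_append, List.countP_append]
      have h0 : (PySem.List.enumerate (List.take pat.length xs) 0)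
          = PySem.List.enumerate (List.take pat.length xs) ((0 : Nat) : Int) := by norm_num
      have hbase : ((0 : Int) + ((List.take pat.length xs).length : Int))
          = ((0 + pat.length : Nat) : Int) := by rw [hlen]; push_cast; ring
      rw [h0, pv_head pat _ 0 (by omega), hbase, pv_shift pat _ 0]
      have h00 : PySem.List.enumerate (List.drop pat.length xs) ((0 : Nat) : Int)
          = PySem.List.enumerate (List.drop pat.length xs) 0 := by norm_num
      rw [h00]
      push_cast
      rw [ih (List.drop pat.length xs) hrest]
      simp only [Function.comp_def, hdrop, pvZC]
      simp

-- per-pattern: B's block fold over ranges+slices equals A's modular fold over enumerate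
theorem pv_score_eq (pat : List Int) (hL : 0 < pat.length) (xs : List Int) :
    (PySem.List.pyRange 0 (xs.length : Int) (pat.length : Int)).foldl
      (fun total start =>
        total + ((PySem.List.slice xs (some start) (some (start + (pat.length : Int)))).zip pat).foldl
            (fun acc q => if q.1 = q.2 then acc + 1 else acc) 0)
      0
    = (PySem.List.enumerate xs 0).foldl
        (fun acc q => if q.2 = PySem.List.pyGetD pat (PySem.Int.mod q.1 (pat.length : Int)) 0 then acc + 1 else acc) (0 : Int) := by
  conv_rhs => rw [PySem.List.foldl_ite_add_one
        (fun q : Int × Int => q.2 = PySem.List.pyGetD pat (PySem.Int.mod q.1 (pat.length : Int)) 0)]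
  rw [PySem.List.pyRange_of_pos 0 (xs.length : Int) (by exact_mod_cast hL)]
  by_cases hn : xs = []
  · subst hn; simp
  · have hpos : (0 : Int) < (xs.length : Int) := by
      have : 0 < xs.length := List.length_pos_iff.mpr hn
      exact_mod_cast this
    rw [if_pos hpos]
    set c : Nat := (((xs.length : Int) - 0 + (pat.length : Int) - 1) / (pat.length : Int)).toNat with hc
    have hcval : c = (xs.length + pat.length - 1) / pat.length := by
      rw [hc]
      have h1 : ((xs.length : Int) - 0 + (pat.length : Int) - 1)
          = ((xs.length + pat.length - 1 : Nat) : Int) := by omega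
      rw [h1, ← Int.natCast_ediv]
      exact Int.toNat_natCast _
    have hcover : xs.length ≤ c * pat.length := by
      rw [hcval]
      have hn1 : xs.length + pat.length - 1 = (xs.length - 1) + pat.length := by omega
      rw [hn1, Nat.add_div_right _ hL]
      have := Nat.lt_div_mul_add (a := xs.length - 1) hL
      ring_nf
      ring_nf at this
      omega
    rw [List.foldl_map, PySem.List.foldl_add
        (g := fun k : Nat =>
          ((PySem.List.slice xs (some (0 + (pat.length : Int) * (k : Int)))
              (some (0 + (pat.length : Int) * (k : Int) + (pat.length : Int)))).zip pat).foldl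
            (fun acc q => if q.1 = q.2 then acc + 1 else acc) 0)]
    rw [pv_blocks pat c xs hcover]
    refine congrArg (fun l : List Int => 0 + l.sum) (List.map_congr_left ?_)
    intro k _
    have hcast : (0 : Int) + (pat.length : Int) * (k : Int) = ((pat.length * k : Nat) : Int) := by
      push_cast; ring
    have hcast2 : (0 : Int) + (pat.length : Int) * (k : Int) + (pat.length : Int)
        = ((pat.length * k : Nat) : Int) + ((pat.length : Nat) : Int) := by push_cast; ring
    rw [hcast2, hcast, PySem.List.slice_natCast_add,
        PySem.List.foldl_ite_add_one (fun q : Int × Int => q.1 = q.2)]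
    unfold pvZC
    norm_num

-- ===== VERDICT (by name: the statement is the Claim_ definition above) =====
theorem solution_good_spec : Claim_equal_solution_good := by
  intro answers _
  unfold Spec_solution_good solution_good solution_good_alt
  simp only [pv_fold_triple, List.foldl_cons, List.foldl_nil,
    pv_score_eq pvPat1 (by decide) answers,
    pv_score_eq pvPat2 (by decide) answers,
    pv_score_eq pvPat3 (by decide) answers,
    List.nil_append, List.cons_append]
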